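-- pv_equiv track=rewrite | github.com/hyunro19/Algorithm | src/py/pg/prbm_bruteforce/NumberBaseball.py | oneRound
-- ===== SOURCE A (Python) =====
-- def oneRound(cnd, rnd):
--     s = 0
--     b = 0
--     for idx, val in enumerate(rnd):
--         if cnd[idx] == val:
--             s += 1
--         elif val in cnd:
--             b += 1
--     return [s, b]
-- ===== SOURCE B (Python) =====
-- def oneRound(cnd, rnd):
--     s = sum(a == b for a, b in zip(cnd, rnd))
--     cset = set(cnd)
--     hits = sum(rnd.count(v) for v in set(rnd) if v in cset)
--     return [s, hits - s]
-- ===== Notes on version B (the rewrite author's own statement) =====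
-- stated objective: alternative
-- what changed: Replaces A's single stateful positional elif loop by a value-grouped computation: strikes from a zip pass, membership hits summed per distinct value of set(rnd) (weighted by rnd.count) against a hash set of the candidates, and balls derived by subtraction via the strike-implies-hit identity.
-- outside the precondition, e.g. on oneRound([1], [1, 2]): A raises IndexError, B returns [1, 0]
import Mathlib
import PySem

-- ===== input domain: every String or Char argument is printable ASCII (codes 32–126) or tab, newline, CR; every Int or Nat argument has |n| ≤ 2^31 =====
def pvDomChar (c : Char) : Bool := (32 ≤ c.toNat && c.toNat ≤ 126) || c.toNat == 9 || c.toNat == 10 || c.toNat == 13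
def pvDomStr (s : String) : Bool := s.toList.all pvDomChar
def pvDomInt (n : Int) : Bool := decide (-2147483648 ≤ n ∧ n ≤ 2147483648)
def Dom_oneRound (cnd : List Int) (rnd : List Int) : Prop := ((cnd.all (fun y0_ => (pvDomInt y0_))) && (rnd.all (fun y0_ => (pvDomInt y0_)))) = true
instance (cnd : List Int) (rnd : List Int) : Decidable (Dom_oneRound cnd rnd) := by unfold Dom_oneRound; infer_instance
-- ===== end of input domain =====

-- B replaces A's single positional elif loop by a value-grouped computation: zip pass for
-- strikes, per-distinct-value weighted hit count over set(rnd), balls by subtraction.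


-- ===== PORT A =====
-- literal port of A's enumerate loop; cnd[idx] is pyGetD, exact under Pre_ (index in range)
def oneRound (cnd : List Int) (rnd : List Int) : List Int :=
  let p := (PySem.List.enumerate rnd).foldl
    (fun (sb : Int × Int) iv =>
      if PySem.List.pyGetD cnd iv.1 0 = iv.2 then (sb.1 + 1, sb.2)
      else if cnd.contains iv.2 then (sb.1, sb.2 + 1)
      else sb)
    ((0 : Int), (0 : Int))
  [p.1, p.2]

-- ===== PORT B =====
-- literal port of Source B: zip strike pass; set(cnd); hit count summed over set(rnd)
-- (the sum over the set is order-independent, so iterating the Set is exact)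
def oneRound_alt (cnd : List Int) (rnd : List Int) : List Int :=
  let s : Int := (cnd.zip rnd).foldl
    (fun acc p => if p.1 == p.2 then acc + 1 else acc) 0
  let cset : PySem.Set Int := PySem.Set.ofList cnd
  let hits : Int := (PySem.Set.ofList rnd).foldl
    (fun acc v => if PySem.Set.contains cset v then acc + (PySem.List.count rnd v : Int) else acc) 0
  [s, hits - s]

-- ===== PRECONDITION & SPEC =====
-- Pre_ excludes exactly the inputs where A raises IndexError (cnd shorter than rnd)
def Pre_oneRound (cnd : List Int) (rnd : List Int) : Prop := rnd.length ≤ cnd.length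
instance (cnd : List Int) (rnd : List Int) : Decidable (Pre_oneRound cnd rnd) := by unfold Pre_oneRound; infer_instance
def pvWitness_oneRound : List Int × List Int := ([1, 2, 3], [1, 3, 2])

def Spec_oneRound (cnd : List Int) (rnd : List Int) (out : List Int) : Prop := out = oneRound_alt cnd rnd
instance (cnd : List Int) (rnd : List Int) (out : List Int) : Decidable (Spec_oneRound cnd rnd out) := by unfold Spec_oneRound; infer_instance

-- ===== CLAIM (what is proved, stated in full; the proofs are below) =====
def Claim_equal_oneRound : Prop := ∀ (cnd : List Int) (rnd : List Int), Dom_oneRound cnd rnd → Pre_oneRound cnd rnd → Spec_oneRound cnd rnd (oneRound cnd rnd)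

-- ===== LEMMAS AND PROOFS =====

-- strike count / ball count as zip counts
def pvS (c rnd : List Int) : Int := ((c.zip rnd).countP (fun p => p.1 == p.2) : Int)
def pvB (full c rnd : List Int) : Int :=
  ((c.zip rnd).countP (fun p => !(p.1 == p.2) && full.contains p.2) : Int)

lemma pyGetD_append_len (pre : List Int) (y : Int) (ys : List Int) :
    PySem.List.pyGetD (pre ++ y :: ys) (pre.length : Int) 0 = y := by
  simp [PySem.List.pyGetD_natCast, List.getD_eq_getElem?_getD]

-- A's fold, generalized over a consumed prefix of cnd
lemma foldA_eq (full : List Int) :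
    ∀ (rnd pre c : List Int), full = pre ++ c → rnd.length ≤ c.length → ∀ s b : Int,
    (PySem.List.enumerate rnd (pre.length : Int)).foldl
      (fun (sb : Int × Int) iv =>
        if PySem.List.pyGetD full iv.1 0 = iv.2 then (sb.1 + 1, sb.2)
        else if full.contains iv.2 then (sb.1, sb.2 + 1)
        else sb) (s, b)
      = (s + pvS c rnd, b + pvB full c rnd) := by
  intro rnd
  induction rnd with
  | nil => intro pre c _ _ s b; simp [PySem.List.enumerate, pvS, pvB]
  | cons r rs ih =>
    intro pre c hfull hlen s b
    cases c with
    | nil => simp at hlen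
    | cons c0 cs =>
      rw [PySem.List.enumerate_cons]
      have hget : PySem.List.pyGetD full (pre.length : Int) 0 = c0 := by
        rw [hfull]; exact pyGetD_append_len pre c0 cs
      have hstep : ((pre.length : Int) + 1) = (((pre ++ [c0]).length : Nat) : Int) := by
        simp
      have hfull' : full = (pre ++ [c0]) ++ cs := by simp [hfull]
      have hlen' : rs.length ≤ cs.length := by simpa using hlen
      simp only [List.foldl_cons, hget, hstep]
      by_cases heq : c0 = r
      · rw [if_pos heq, ih (pre ++ [c0]) cs hfull' hlen']
        simp [pvS, pvB, heq, Prod.ext_iff]; omega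
      · rw [if_neg heq]
        by_cases hmem : full.contains r
        · rw [if_pos hmem, ih (pre ++ [c0]) cs hfull' hlen']
          have hmem' : r ∈ full := by simpa using hmem
          simp [pvS, pvB, heq, hmem', Prod.ext_iff]; omega
        · rw [if_neg hmem, ih (pre ++ [c0]) cs hfull' hlen']
          have hmem' : ¬ r ∈ full := by simpa using hmem
          simp [pvS, pvB, heq, hmem']

-- peeling one fresh value v off the distinct-value list splits the filtered count
lemma countP_peel (cnd rnd L : List Int) (v : Int) (hv : v ∉ L) :
    rnd.countP (fun x => cnd.contains x && (v :: L).contains x)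
      = (if cnd.contains v then rnd.count v else 0)
        + rnd.countP (fun x => cnd.contains x && L.contains x) := by
  induction rnd with
  | nil => simp
  | cons r rs ih =>
    simp only [List.countP_cons, List.count_cons, ih]
    by_cases hrv : r = v <;> by_cases hc : r ∈ cnd <;> by_cases hL : r ∈ L <;>
      simp_all <;> omega

-- B's hit fold over any nodup value list counts membership hits restricted to that list
lemma hits_fold_gen (cnd rnd : List Int) :
    ∀ (L : List Int), L.Nodup → ∀ a : Int,
    L.foldl (fun acc v => if PySem.Set.contains (PySem.Set.ofList cnd) v then acc + (PySem.List.count rnd v : Int) else acc) a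
      = a + (rnd.countP (fun x => cnd.contains x && L.contains x) : Int) := by
  intro L
  induction L with
  | nil => intro _ a; simp
  | cons v L' ih =>
    intro hnd a
    have hv : v ∉ L' := by simp [List.nodup_cons] at hnd; exact hnd.1
    have hnd' : L'.Nodup := (List.nodup_cons.mp hnd).2
    simp only [List.foldl_cons, ih hnd']
    have hcc : PySem.Set.contains (PySem.Set.ofList cnd) v = cnd.contains v := by
      simp [PySem.Set.contains]
    rw [countP_peel cnd rnd L' v hv, hcc]
    by_cases hc : v ∈ cnd
    · simp [hc, PySem.List.count]; ring
    · simp [hc]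

-- B's hits = number of rnd positions whose value occurs in cnd
lemma hits_eq (cnd rnd : List Int) :
    (PySem.Set.ofList rnd).foldl
      (fun acc v => if PySem.Set.contains (PySem.Set.ofList cnd) v then acc + (PySem.List.count rnd v : Int) else acc) 0
      = (rnd.countP (fun v => cnd.contains v) : Int) := by
  rw [hits_fold_gen cnd rnd (PySem.Set.ofList rnd) (PySem.Set.nodup_ofList rnd) 0]
  have h2 : rnd.countP (fun x => cnd.contains x && List.contains (PySem.Set.ofList rnd) x)
      = rnd.countP (fun v => cnd.contains v) := by
    apply List.countP_congr
    intro x hx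
    have hmem : List.contains (PySem.Set.ofList rnd) x = true := by
      simp [PySem.Set.mem_ofList, hx]
    simp
    exact fun _ => hx
  rw [h2]; ring

-- Nat-level split: membership hits = strikes + balls (a strike position is a hit)
lemma countP_split (cnd : List Int) :
    ∀ l : List (Int × Int), (∀ p ∈ l, p.1 ∈ cnd) →
    l.countP (fun p => cnd.contains p.2)
      = l.countP (fun p => p.1 == p.2) + l.countP (fun p => !(p.1 == p.2) && cnd.contains p.2) := by
  intro l
  induction l with
  | nil => simp
  | cons p ps ihp =>
    intro hall
    have hp1 : p.1 ∈ cnd := hall p (by simp)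
    have hrest := ihp (fun q hq => hall q (List.mem_cons_of_mem _ hq))
    simp only [List.countP_cons]
    by_cases heq : p.1 = p.2
    · have hm : p.2 ∈ cnd := heq ▸ hp1
      simp [heq, hm] at hrest ⊢
      omega
    · by_cases hm : p.2 ∈ cnd
      · simp [heq, hm] at hrest ⊢
        omega
      · simp [heq, hm] at hrest ⊢
        omega

lemma total_split (cnd rnd : List Int) (h : rnd.length ≤ cnd.length) :
    (rnd.countP (fun v => cnd.contains v) : Int) = pvS cnd rnd + pvB cnd cnd rnd := by
  have hsnd : (cnd.zip rnd).map Prod.snd = rnd := List.map_snd_zip h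
  have hcount : rnd.countP (fun v => cnd.contains v)
      = (cnd.zip rnd).countP (fun p => cnd.contains p.2) := by
    conv_lhs => rw [← hsnd]
    rw [List.countP_map]
    rfl
  rw [hcount, countP_split cnd (cnd.zip rnd) (fun p hp => (List.of_mem_zip hp).1)]
  unfold pvS pvB
  push_cast
  ring

-- ===== VERDICT (by name: the statement is the Claim_ definition above) =====
theorem oneRound_spec : Claim_equal_oneRound := by
  intro cnd rnd _ hpre
  unfold Spec_oneRound oneRound oneRound_alt
  have hA := foldA_eq cnd rnd [] cnd (by simp) hpre 0 0
  simp only [List.length_nil, Nat.cast_zero, zero_add] at hA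
  have hs := PySem.List.foldl_if_add_one (p := fun p : Int × Int => p.1 == p.2)
    (l := cnd.zip rnd) (a := (0 : Int))
  simp only [hA, hits_eq cnd rnd, total_split cnd rnd hpre]
  simp only [hs, zero_add, List.cons.injEq]
  exact ⟨rfl, by unfold pvS; ring, trivial⟩
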